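/- GENERATED by farm/mkstatement.py from design/units.tsv (unit `DGifDecreaseImageCounter.E`) and the assertions of Gif/Spec/Seg_DGifDecreaseImageCounter.lean — do not edit.
   THE STATEMENT of the proof unit `DGifDecreaseImageCounter.E`: segment E of `DGifDecreaseImageCounter` (4 instructions; entries 0x10a531;
   exits ret; ranges 0x10a531-0x10a538)
   takes each of its entry assertions to one of its exit assertions (`Gif.Spec.DGifDecreaseImageCounter.SegE`), given the contracts of its callees.
   What the names mean: ProgX/Base/Spec/Basic.lean (the shared hypotheses), Gif/Spec/Seg_DGifDecreaseImageCounter.lean (the assertions). The theorem to prove: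
   `theorem DGifDecreaseImageCounter_E_ok : Gif.Spec.DGifDecreaseImageCounter_E.Statement`. -/
import Gif.Code
import Gif.Dec.All
import Gif.Labels
import Gif.Spec.Seg_DGifDecreaseImageCounter
namespace Gif.Spec.DGifDecreaseImageCounter_E
open X86 X86.User Asan

/-- The statement of unit `DGifDecreaseImageCounter.E`. -/
def Statement : Prop :=
  ∀ (Lay : Layout) (_hLay : Lay.hi = 0x1000000) (μ : Microarch) (_hμ : UserX.MicroOK μ) (u₀ : State)
    (_hcode : HasCodeNat Lay u₀ Gif.L.DGifDecreaseImageCounter.entry Gif.Code.code_DGifDecreaseImageCounter.nat Gif.L.DGifDecreaseImageCounter.size),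
    Gif.Spec.DGifDecreaseImageCounter.SegE Lay μ u₀

end Gif.Spec.DGifDecreaseImageCounter_E
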